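-- pv_equiv track=rewrite | github.com/4elovekMupa/python-labs | BinaryCode.py | funkcua
-- ===== SOURCE A (Python) =====
-- def funkcua (a):
--     qwerty=""
--     while a//2!=0:
--         qwerty += (str(a%2) + " ")
--         a//=2
--     qwerty += "1"
--     c = qwerty.split(" ")
--     c.reverse()
--     qwerty = "".join(c)
--     qwerty = int(qwerty)
--     return qwerty
-- ===== SOURCE B (Python) =====
-- def funkcua(a):
--     return int(bin(a)[2:])
-- ===== Notes on version B (the rewrite author's own statement) =====
-- stated objective: idiomatic
-- what changed: Replaces the hand-written halving loop that builds a space-separated bit string, splits, reverses and re-joins it with the builtin bin() conversion plus a slice and int().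
-- intended difference: For a = 0 A returns 1 (its loop never runs and it unconditionally appends a leading '1'), while B returns 0, the correct decimal rendering of the binary of 0. — e.g. on funkcua(0): A returns 1, B returns 0
import Mathlib
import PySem

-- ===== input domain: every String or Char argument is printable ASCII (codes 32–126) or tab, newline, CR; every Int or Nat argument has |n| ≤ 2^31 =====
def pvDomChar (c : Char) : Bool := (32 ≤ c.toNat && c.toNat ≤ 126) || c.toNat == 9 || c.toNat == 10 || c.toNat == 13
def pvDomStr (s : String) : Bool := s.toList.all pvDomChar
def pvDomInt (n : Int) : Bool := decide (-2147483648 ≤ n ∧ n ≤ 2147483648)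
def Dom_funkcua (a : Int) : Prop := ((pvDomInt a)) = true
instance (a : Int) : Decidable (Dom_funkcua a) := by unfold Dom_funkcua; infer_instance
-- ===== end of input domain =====

-- B replaces A's hand-written halving loop + space-separated string build/split/reverse/join
-- with the idiomatic int(bin(a)[2:]); on a = 0 B returns 0 where A returns 1 (stated as D_ below).

-- ===== PORT A =====
-- while a//2 != 0: qwerty += str(a%2)+" "; a //= 2
-- (the '1 ≤ a' conjunct is a termination guard only: for a < 0 the Python loop never
--  terminates, and those inputs are outside Pre_funkcua)
def funkcuaLoop (a : Int) (qwerty : String) : String :=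
  if _h : PySem.Int.floordiv a 2 ≠ 0 ∧ 1 ≤ a then
    funkcuaLoop (PySem.Int.floordiv a 2) (qwerty ++ (PySem.Int.toStr (PySem.Int.mod a 2) ++ " "))
  else qwerty
termination_by a.toNat
decreasing_by
  rw [PySem.Int.floordiv_eq_ediv_of_pos (by omega)] at *
  omega

def funkcua (a : Int) : Int :=
  let qwerty := funkcuaLoop a ""
  let qwerty := qwerty ++ "1"
  let c := (PySem.Str.split? qwerty " ").getD []   -- qwerty.split(" "); sep ≠ "" so never none
  let c := c.reverse
  let qwerty := PySem.Str.join "" c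
  (PySem.Int.ofStr? qwerty).getD 0                 -- int(qwerty); all-digit string, never ValueError

-- ===== PORT B =====
def funkcua_alt (a : Int) : Int :=
  (PySem.Int.ofStr? (PySem.Str.slice (PySem.Int.pyBin a) (some 2) none)).getD 0

-- ===== PRECONDITION & SPEC =====
-- Pre_ excludes a < 0, on which Python A's while loop never terminates.
def Pre_funkcua (a : Int) : Prop := 0 ≤ a
instance (a : Int) : Decidable (Pre_funkcua a) := by unfold Pre_funkcua; infer_instance
def pvWitness_funkcua : Int := (5)

-- For a = 0 A returns 1 (its loop never runs and it unconditionally appends a leading '1'),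
-- while B returns 0, the correct decimal rendering of the binary of 0.
def D_funkcua (a : Int) : Prop := a = 0
instance (a : Int) : Decidable (D_funkcua a) := by unfold D_funkcua; infer_instance

def Spec_funkcua (a : Int) (out : Int) : Prop := ¬ D_funkcua a → out = funkcua_alt a
instance (a : Int) (out : Int) : Decidable (Spec_funkcua a out) := by unfold Spec_funkcua; infer_instance

def pvDiffWitness_funkcua : Int := (0)
def pvDiffWitnessOut_funkcua : Int × Int := (1, 0)

-- ===== CLAIM (what is proved, stated in full; the proofs are below) =====
def Claim_unchanged_funkcua : Prop := ∀ (a : Int), Dom_funkcua a → Pre_funkcua a → Spec_funkcua a (funkcua a)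
def Claim_changed_funkcua : Prop := Dom_funkcua (pvDiffWitness_funkcua) ∧ Pre_funkcua (pvDiffWitness_funkcua) ∧ D_funkcua (pvDiffWitness_funkcua) ∧ funkcua (pvDiffWitness_funkcua) = pvDiffWitnessOut_funkcua.1 ∧ funkcua_alt (pvDiffWitness_funkcua) = pvDiffWitnessOut_funkcua.2 ∧ pvDiffWitnessOut_funkcua.1 ≠ pvDiffWitnessOut_funkcua.2
def Claim_exact_funkcua : Prop := ∀ (a : Int), Dom_funkcua a → Pre_funkcua a → D_funkcua a → funkcua a ≠ funkcua_alt a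

-- ===== LEMMAS AND PROOFS =====

-- binary digits of m, LOW bit first, including the leading digit (bitsLow 0 = ['0'])
def bitsLow (m : Nat) : List Char :=
  if m < 2 then [Nat.digitChar m] else Nat.digitChar (m % 2) :: bitsLow (m / 2)
decreasing_by omega

-- what A's loop appends: "b " blocks, low bit first, leading bit omitted
def blocksOf (m : Nat) : List Char :=
  if m < 2 then [] else Nat.digitChar (m % 2) :: ' ' :: blocksOf (m / 2)
decreasing_by omega

-- the loop's bits without spaces, leading bit omitted
def stripOf (m : Nat) : List Char :=
  if m < 2 then [] else Nat.digitChar (m % 2) :: stripOf (m / 2)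
decreasing_by omega

-- reference model of str.split(" ")
def mySplit (pre : List Char) : List Char → List (List Char)
  | [] => [pre]
  | c :: rest => if c = ' ' then pre :: mySplit [] rest else mySplit (pre ++ [c]) rest

theorem digitChar_mod_two_ne_space (m : Nat) : Nat.digitChar (m % 2) ≠ ' ' := by
  rcases Nat.mod_two_eq_zero_or_one m with h | h <;> rw [h] <;> decide

theorem mod_two_natCast (n : Nat) :
    PySem.Int.mod (n : Int) 2 = ((n % 2 : Nat) : Int) := by
  exact_mod_cast PySem.Int.mod_natCast n 2

theorem toChars_mod_two (n : Nat) :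
    PySem.Int.toChars ((n % 2 : Nat) : Int) = [Nat.digitChar (n % 2)] := by
  rcases Nat.mod_two_eq_zero_or_one n with h | h <;> rw [h] <;> decide

theorem funkcuaLoop_toList (n : Nat) (hn : 1 ≤ n) (q : String) :
    (funkcuaLoop (n : Int) q).toList = q.toList ++ blocksOf n := by
  induction n using Nat.strong_induction_on generalizing q with
  | _ n ih =>
    rw [funkcuaLoop, blocksOf]
    by_cases h2 : n < 2
    · have : ¬ (PySem.Int.floordiv (n : Int) 2 ≠ 0 ∧ 1 ≤ (n : Int)) := by
        rw [PySem.Int.floordiv_eq_ediv_of_pos (by omega)]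
        omega
      rw [dif_neg this, if_pos h2]
      simp
    · have hcond : PySem.Int.floordiv (n : Int) 2 ≠ 0 ∧ 1 ≤ (n : Int) := by
        rw [PySem.Int.floordiv_eq_ediv_of_pos (by omega)]
        omega
      rw [dif_pos hcond, if_neg h2]
      have hfd : PySem.Int.floordiv (n : Int) 2 = ((n / 2 : Nat) : Int) := by
        rw [PySem.Int.floordiv_eq_ediv_of_pos (by omega)]
        omega
      rw [hfd, mod_two_natCast n, ih (n / 2) (by omega) (by omega), String.toList_append,
        String.toList_append, PySem.Int.toList_toStr, toChars_mod_two n]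
      simp

theorem splitOn_go_spec (cs : List Char) :
    ∀ (fuel : Nat) (cur : List Char) (acc : List (List Char)), cs.length ≤ fuel →
    PySem.Chars.splitOn.go [' '] fuel cs cur acc = acc.reverse ++ mySplit cur.reverse cs := by
  induction cs with
  | nil =>
    intro fuel cur acc _
    cases fuel <;> simp [PySem.Chars.splitOn.go, mySplit]
  | cons c rest ih =>
    intro fuel cur acc hlen
    cases fuel with
    | zero => simp at hlen
    | succ f =>
      rw [PySem.Chars.splitOn.go]
      by_cases hc : c = ' '
      · subst hc
        have hpre : [' '].isPrefixOf (' ' :: rest) = true := by simp [List.isPrefixOf]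
        simp only [hpre, if_pos]
        rw [show List.drop [' '].length (' ' :: rest) = rest from rfl]
        rw [ih f [] ((cur.reverse) :: acc) (by simpa using hlen)]
        simp [mySplit]
      · have hpre : [' '].isPrefixOf (c :: rest) = false := by
          simp [List.isPrefixOf]
          exact fun h => hc h.symm
        simp only [hpre]
        rw [if_neg (by simp)]
        rw [ih f (c :: cur) acc (by simpa using hlen)]
        simp [mySplit, hc]

theorem splitOn_space (cs : List Char) :
    PySem.Chars.splitOn cs [' '] = mySplit [] cs := by
  rw [PySem.Chars.splitOn, splitOn_go_spec cs (cs.length + 1) [] [] (by omega)]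
  rfl

theorem mySplit_blocksOf (n : Nat) (t : List Char) :
    mySplit [] (blocksOf n ++ t) = (stripOf n).map (fun c => [c]) ++ mySplit [] t := by
  induction n using Nat.strong_induction_on with
  | _ n ih =>
    rw [blocksOf, stripOf]
    by_cases h2 : n < 2
    · simp [h2]
    · rw [if_neg h2, if_neg h2]
      simp only [List.cons_append, mySplit, if_neg (digitChar_mod_two_ne_space n),
        if_pos rfl, List.map_cons]
      rw [ih (n / 2) (by omega)]
      simp

theorem bitsLow_eq_strip (n : Nat) (hn : 1 ≤ n) :
    bitsLow n = stripOf n ++ ['1'] := by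
  induction n using Nat.strong_induction_on with
  | _ n ih =>
    rw [bitsLow, stripOf]
    by_cases h2 : n < 2
    · have h1 : n = 1 := by omega
      subst h1
      rw [if_pos (by omega), if_pos (by omega)]
      decide
    · rw [if_neg h2, if_neg h2, ih (n / 2) (by omega) (by omega)]
      simp

theorem toDigitsCore_two (n : Nat) :
    ∀ (fuel : Nat) (ds : List Char), n < fuel →
    Nat.toDigitsCore 2 fuel n ds = (bitsLow n).reverse ++ ds := by
  induction n using Nat.strong_induction_on with
  | _ n ih =>
    intro fuel ds hfuel
    cases fuel with
    | zero => omega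
    | succ f =>
      rw [Nat.toDigitsCore, bitsLow]
      by_cases h2 : n < 2
      · have : n / 2 = 0 := by omega
        have hm : n % 2 = n := by omega
        simp [this, hm, h2]
      · have hne : ¬ n / 2 = 0 := by omega
        rw [if_neg h2]
        simp only [hne, if_false]
        rw [ih (n / 2) (by omega) f ((n % 2).digitChar :: ds) (by omega)]
        simp

theorem toDigits_two (n : Nat) : Nat.toDigits 2 n = (bitsLow n).reverse := by
  rw [Nat.toDigits, toDigitsCore_two n (n + 1) [] (by omega)]
  simp

theorem ofStr?_toList (s : String) : PySem.Int.ofStr? s = PySem.Int.ofChars? s.toList := by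
  conv_lhs => rw [← String.ofList_toList (s := s)]
  rw [PySem.Int.ofStr?_ofList]

-- A's whole string pipeline produces the binary digits of n, high bit first
theorem funkcua_chars (n : Nat) (hn : 1 ≤ n) :
    funkcua (n : Int) = (PySem.Int.ofChars? ((bitsLow n).reverse)).getD 0 := by
  unfold funkcua
  dsimp only
  have hq2 : (funkcuaLoop (n : Int) "" ++ "1").toList = blocksOf n ++ ['1'] := by
    rw [String.toList_append, funkcuaLoop_toList n hn]
    simp
  set q2 : String := funkcuaLoop (n : Int) "" ++ "1" with hq2def
  -- extract the split
  have hsplit : PySem.Chars.split? q2.toList " ".toList =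
      some (PySem.Chars.splitOn q2.toList [' ']) := by
    simp [PySem.Chars.split?]
  have hmap := PySem.Str.split?_map q2 " "
  rw [hsplit] at hmap
  obtain ⟨ps, hps, hps2⟩ : ∃ ps, PySem.Str.split? q2 " " = some ps ∧
      ps.map String.toList = PySem.Chars.splitOn q2.toList [' '] := by
    cases h : PySem.Str.split? q2 " " with
    | none => rw [h] at hmap; simp at hmap
    | some ps => rw [h] at hmap; exact ⟨ps, rfl, by simpa using hmap⟩
  rw [hps]
  simp only [Option.getD_some]
  rw [ofStr?_toList, PySem.Str.toList_join]
  have hpieces : PySem.Chars.splitOn q2.toList [' '] =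
      (stripOf n).map (fun c => [c]) ++ [['1']] := by
    rw [hq2, splitOn_space, mySplit_blocksOf]
    rfl
  have hjoin : PySem.Chars.join "".toList (ps.reverse.map String.toList) = (bitsLow n).reverse := by
    rw [List.map_reverse, hps2, hpieces]
    have : ((stripOf n).map (fun c => [c]) ++ [['1']]).reverse =
        ('1' :: (stripOf n).reverse).map (fun c => [c]) := by
      simp [List.map_reverse]
    rw [this]
    rw [show ("".toList : List Char) = [] from rfl, PySem.Chars.join_nil_singletons]
    rw [bitsLow_eq_strip n hn]
    simp
  rw [hjoin]

theorem funkcua_alt_chars (n : Nat) :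
    funkcua_alt (n : Int) = (PySem.Int.ofChars? ((bitsLow n).reverse)).getD 0 := by
  unfold funkcua_alt
  rw [ofStr?_toList, PySem.Str.toList_slice]
  have h1 : (PySem.Int.pyBin (n : Int)).toList = '0' :: 'b' :: Nat.toDigits 2 n := by
    rw [PySem.Int.toList_pyBin, PySem.Int.toBinChars0b]
    rw [if_neg (by omega)]
    simp
  rw [h1]
  have h2 : PySem.Chars.slice ('0' :: 'b' :: Nat.toDigits 2 n) (some 2) none =
      Nat.toDigits 2 n := by
    rw [PySem.Chars.slice_eq_listSlice,
      PySem.List.slice_from ('0' :: 'b' :: Nat.toDigits 2 n) (show (0:Int) ≤ 2 by decide)]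
    rfl
  rw [h2, toDigits_two]

-- ===== VERDICT (by name: the statement is the Claim_ definitions above) =====
theorem funkcua_spec : Claim_unchanged_funkcua := by
  intro a _ hpre hnd
  have h0 : a ≠ 0 := fun h => hnd h
  have hrw : a = ((a.toNat : Nat) : Int) := by
    unfold Pre_funkcua at hpre; omega
  rw [hrw, funkcua_chars a.toNat (by omega), funkcua_alt_chars]

theorem funkcua_changed : Claim_changed_funkcua := by
  unfold Claim_changed_funkcua
  refine ⟨by decide, by decide, by decide, ?_, by decide, by decide⟩
  show funkcua 0 = 1
  unfold funkcua
  rw [funkcuaLoop, dif_neg (by decide)]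
  decide

theorem funkcua_tight : Claim_exact_funkcua := by
  intro a _ _ hd
  unfold D_funkcua at hd
  subst hd
  have hA : funkcua 0 = 1 := by
    unfold funkcua
    rw [funkcuaLoop, dif_neg (by decide)]
    decide
  have hB : funkcua_alt 0 = 0 := by decide
  rw [hA, hB]
  decide
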